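-- pv_equiv track=rewrite | github.com/mlshehab/identifiability_w_reward_machines | SAT.py | transpose_boolean_matrix
-- ===== SOURCE A (Python) =====
-- def transpose_boolean_matrix(matrix):
--     # Number of rows and columns in the input matrix
--     num_rows = len(matrix)
--     num_cols = len(matrix[0])
--
--     # Initialize the transposed matrix
--     transposed = [[None for _ in range(num_rows)] for _ in range(num_cols)]
--
--     # Transpose operation: Swap rows and columns
--     for i in range(num_rows):
--         for j in range(num_cols):
--             transposed[j][i] = matrix[i][j]
--
--     return transposed
-- ===== SOURCE B (Python) =====
-- def transpose_boolean_matrix(matrix):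
--     # Flatten the matrix row-major into one buffer, then gather each output row
--     # by strided index arithmetic (column j lives at positions j, j+w, j+2w, ...).
--     w = len(matrix[0])
--     flat = []
--     for row in matrix:
--         flat += row[:w]
--     return [[flat[k] for k in range(j, len(flat), w)] for j in range(w)]
-- ===== Notes on version B (the rewrite author's own statement) =====
-- stated objective: alternative
-- what changed: B flattens the matrix row-major into a single 1-D buffer and then reconstructs each output row by strided index arithmetic (positions j, j+w, j+2w, ...), instead of A's nested i,j loops scattering elements into a pre-allocated None grid.
import Mathlib
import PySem

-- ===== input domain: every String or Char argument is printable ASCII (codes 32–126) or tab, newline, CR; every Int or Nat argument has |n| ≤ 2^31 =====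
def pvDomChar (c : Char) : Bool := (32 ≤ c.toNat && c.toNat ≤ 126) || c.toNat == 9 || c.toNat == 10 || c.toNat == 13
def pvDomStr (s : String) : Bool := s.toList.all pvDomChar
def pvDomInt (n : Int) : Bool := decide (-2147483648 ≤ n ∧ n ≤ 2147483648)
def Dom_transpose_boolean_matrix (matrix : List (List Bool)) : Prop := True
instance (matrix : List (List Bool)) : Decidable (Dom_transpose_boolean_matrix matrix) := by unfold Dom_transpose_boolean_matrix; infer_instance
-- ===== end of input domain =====

-- B flattens the matrix row-major into one 1-D buffer and regathers each output row by
-- strided index arithmetic, instead of A's nested-loop scatter into a pre-allocated grid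
-- (objective: alternative; equivalence is on the return value only).

-- ===== PORT A =====
-- the body of A's inner `for j` loop (one row scattered into the grid)
def pvGridRow (matrix : List (List Bool)) (num_cols : Nat) (t : List (List Bool)) (i : Nat) :
    List (List Bool) :=
  (List.range num_cols).foldl
    (fun t j => t.set j ((t.getD j []).set i ((matrix.getD i []).getD j false))) t

def transpose_boolean_matrix (matrix : List (List Bool)) : List (List Bool) :=
  let num_rows := matrix.length
  -- matrix[0]: Pre_ guarantees the matrix is nonempty (Python raises IndexError on [])
  let num_cols := (matrix.headD []).length
  -- the None placeholders are represented by `false`; Pre_ guarantees each is overwritten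
  let transposed := List.replicate num_cols (List.replicate num_rows false)
  (List.range num_rows).foldl (pvGridRow matrix num_cols) transposed

-- ===== PORT B =====
def transpose_boolean_matrix_alt (matrix : List (List Bool)) : List (List Bool) :=
  -- w = len(matrix[0]); Pre_ guarantees the matrix is nonempty
  let w := (matrix.headD []).length
  -- flat = []; for row in matrix: flat += row[:w]
  let flat := matrix.foldl (fun acc row => acc ++ PySem.List.slice row none (some (w : Int))) []
  -- [[flat[k] for k in range(j, len(flat), w)] for j in range(w)]
  -- flat[k]: under Pre_ every generated k is in range, so the default is never used
  (PySem.List.pyRange 0 (w : Int) 1).map (fun j =>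
    (PySem.List.pyRange j (flat.length : Int) (w : Int)).map (fun k =>
      PySem.List.pyGetD flat k false))

-- ===== PRECONDITION & SPEC =====
-- Pre_ excludes exactly the inputs where Python A raises IndexError: the empty matrix
-- (matrix[0]) and ragged matrices with a row shorter than the first row (matrix[i][j]).
def Pre_transpose_boolean_matrix (matrix : List (List Bool)) : Prop :=
  matrix ≠ [] ∧ ∀ row ∈ matrix, (matrix.headD []).length ≤ row.length

instance (matrix : List (List Bool)) : Decidable (Pre_transpose_boolean_matrix matrix) := by
  unfold Pre_transpose_boolean_matrix; infer_instance

def pvWitness_transpose_boolean_matrix : List (List Bool) :=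
  [[true, false], [false, true], [true, true]]

def Spec_transpose_boolean_matrix (matrix : List (List Bool)) (out : List (List Bool)) : Prop :=
  out = transpose_boolean_matrix_alt matrix
instance (matrix : List (List Bool)) (out : List (List Bool)) : Decidable (Spec_transpose_boolean_matrix matrix out) := by unfold Spec_transpose_boolean_matrix; infer_instance

-- ===== CLAIM (what is proved, stated in full; the proofs are below) =====
def Claim_equal_transpose_boolean_matrix : Prop := ∀ (matrix : List (List Bool)), Dom_transpose_boolean_matrix matrix → Pre_transpose_boolean_matrix matrix → Spec_transpose_boolean_matrix matrix (transpose_boolean_matrix matrix)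

-- ===== LEMMAS AND PROOFS =====

-- the common canonical form: column j is matrix's j-th entries, for j < c
def pvCanon (matrix : List (List Bool)) (c : Nat) : List (List Bool) :=
  (List.range c).map (fun j => matrix.map (fun r => r.getD j false))

-- A-side: one pass of the inner `for j` loop, described column by column
theorem pvGridRow_eq (matrix : List (List Bool)) (c i : Nat) (t : List (List Bool))
    (hlen : t.length = c) :
    pvGridRow matrix c t i =
      (List.range c).map (fun j => (t.getD j []).set i ((matrix.getD i []).getD j false)) := by
  unfold pvGridRow
  have key : ∀ m, m ≤ c →
      (List.range m).foldl
        (fun t' j => t'.set j ((t'.getD j []).set i ((matrix.getD i []).getD j false))) t =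
      (List.range c).map (fun j =>
        if j < m then (t.getD j []).set i ((matrix.getD i []).getD j false) else t.getD j []) := by
    intro m
    induction m with
    | zero =>
      intro _
      simp only [List.range_zero, List.foldl_nil]
      apply List.ext_getElem (by simp [hlen])
      intro j hj hj2
      simp only [List.getElem_map, List.getElem_range, Nat.not_lt_zero, if_false]
      rw [List.getD_eq_getElem?_getD, List.getElem?_eq_getElem hj]
      rfl
    | succ m ihm =>
      intro hm
      have hm' : m ≤ c := Nat.le_of_succ_le hm
      rw [List.range_succ, List.foldl_append, List.foldl_cons, List.foldl_nil, ihm hm']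
      have hgetDm : List.getD ((List.range c).map (fun j =>
          if j < m then (t.getD j []).set i ((matrix.getD i []).getD j false) else t.getD j []))
          m [] = t.getD m [] := by
        rw [List.getD_eq_getElem?_getD, List.getElem?_map, List.getElem?_range (by omega)]
        simp
      apply List.ext_getElem (by simp)
      intro j hj1 hj2
      have hjc : j < c := by simpa using hj2
      by_cases hjm : j = m
      · subst hjm
        rw [List.getElem_set_self (by simpa using hjc)]
        rw [hgetDm]
        simp only [List.getElem_map, List.getElem_range]
        simp
      · rw [List.getElem_set_ne (Ne.symm hjm)]
        simp only [List.getElem_map, List.getElem_range]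
        simp only [show (j < m + 1) = (j < m) from propext (by omega)]
  rw [key c le_rfl]
  apply List.map_congr_left
  intro j hj
  simp only [List.mem_range] at hj
  simp [hj]

-- A-side: the whole double loop equals the canonical transpose
theorem pvAfold_eq (matrix : List (List Bool)) (c : Nat) :
    (List.range matrix.length).foldl (pvGridRow matrix c)
      (List.replicate c (List.replicate matrix.length false)) = pvCanon matrix c := by
  have key : ∀ n', n' ≤ matrix.length →
      (List.range n').foldl (pvGridRow matrix c)
        (List.replicate c (List.replicate matrix.length false)) =
      (List.range c).map (fun j => (List.range matrix.length).map (fun k =>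
        if k < n' then (matrix.getD k []).getD j false else false)) := by
    intro n'
    induction n' with
    | zero =>
      intro _
      simp only [List.range_zero, List.foldl_nil]
      apply List.ext_getElem (by simp)
      intro j hj1 hj2
      simp only [List.length_replicate] at hj1
      apply List.ext_getElem (by simp)
      intro k hk1 hk2
      simp [List.getElem_replicate]
    | succ n ihn =>
      intro hn
      have hn' : n ≤ matrix.length := Nat.le_of_succ_le hn
      rw [List.range_succ, List.foldl_append, List.foldl_cons, List.foldl_nil, ihn hn']
      rw [pvGridRow_eq matrix c n _ (by simp)]
      apply List.map_congr_left
      intro j hj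
      simp only [List.mem_range] at hj
      have hget : List.getD ((List.range c).map (fun j => (List.range matrix.length).map
          (fun k => if k < n then (matrix.getD k []).getD j false else false))) j [] =
          (List.range matrix.length).map
            (fun k => if k < n then (matrix.getD k []).getD j false else false) := by
        rw [List.getD_eq_getElem?_getD, List.getElem?_map, List.getElem?_range hj]
        rfl
      rw [hget]
      apply List.ext_getElem (by simp)
      intro k hk1 hk2
      have hkm : k < matrix.length := by simpa using hk2
      by_cases hkn : k = n
      · subst hkn
        rw [List.getElem_set_self (by simpa using hkm)]
        simp only [List.getElem_map, List.getElem_range]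
        simp
      · rw [List.getElem_set_ne (Ne.symm hkn)]
        simp only [List.getElem_map, List.getElem_range]
        simp only [show (k < n + 1) = (k < n) from propext (by omega)]
  rw [key matrix.length le_rfl]
  unfold pvCanon
  apply List.map_congr_left
  intro j _
  apply List.ext_getElem (by simp)
  intro k hk1 hk2
  simp only [List.length_map, List.length_range] at hk1
  simp only [List.getElem_map, List.getElem_range, hk1, if_true]
  have hrow : matrix.getD k [] = matrix[k] := by
    rw [List.getD_eq_getElem?_getD, List.getElem?_eq_getElem hk1]
    rfl
  rw [hrow, List.getD_eq_getElem?_getD]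

-- B-side: range(j, n*w, w) enumerates j + w*k for k < n
theorem pvStrideRange (n w j : Nat) (hj : j < w) :
    PySem.List.pyRange (j : Int) ((n * w : Nat) : Int) (w : Int) =
      (List.range n).map (fun k : Nat => ((j + w * k : Nat) : Int)) := by
  have hw : (0 : Int) < (w : Int) := by exact_mod_cast Nat.lt_of_le_of_lt (Nat.zero_le j) hj
  rw [PySem.List.pyRange_of_pos _ _ hw]
  have hcount : (if (j : Int) < ((n * w : Nat) : Int)
      then ((((n * w : Nat) : Int) - j + w - 1) / w).toNat else 0) = n := by
    cases n with
    | zero =>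
      rw [if_neg (by push_cast; omega)]
    | succ m =>
      rw [if_pos (by push_cast; nlinarith)]
      have harith : (((m + 1) * w : Nat) : Int) - j + w - 1 = ((w : Int) - 1 - j) + (m + 1) * w := by
        push_cast; ring
      rw [harith, Int.add_mul_ediv_right _ _ (by omega)]
      rw [Int.ediv_eq_zero_of_lt (by omega) (by omega)]
      simp
  rw [hcount]
  apply List.map_congr_left
  intro k _
  push_cast
  ring

-- B-side: element (t*w + j) of the flattening of rows of length w is rows[t][j]
theorem pvFlatGet (rows : List (List Bool)) (w : Nat)
    (hall : ∀ r ∈ rows, r.length = w) :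
    ∀ (t j : Nat), j < w → t < rows.length →
      rows.flatten.getD (t * w + j) false = (rows.getD t []).getD j false := by
  induction rows with
  | nil => intro t j _ ht; simp at ht
  | cons r rest ih =>
    intro t j hj ht
    have hr : r.length = w := hall r (by simp)
    cases t with
    | zero =>
      simp only [List.flatten_cons, Nat.zero_mul, Nat.zero_add, List.getD_cons_zero]
      rw [List.getD_append _ _ _ j (by omega)]
    | succ t' =>
      simp only [List.flatten_cons, List.getD_cons_succ]
      rw [List.getD_append_right _ _ _ _ (by rw [hr]; ring_nf; nlinarith)]
      have : (t' + 1) * w + j - r.length = t' * w + j := by rw [hr]; ring_nf; omega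
      rw [this]
      exact ih (fun s hs => hall s (by simp [hs])) t' j hj (by simpa using ht)

-- B-side: the flatten-and-stride construction equals the canonical transpose
theorem pvBside_eq (matrix : List (List Bool)) (w : Nat)
    (hw : (matrix.headD []).length = w)
    (hall : ∀ row ∈ matrix, w ≤ row.length) :
    transpose_boolean_matrix_alt matrix = pvCanon matrix w := by
  have hflat : matrix.foldl
      (fun acc row => acc ++ PySem.List.slice row none (some (w : Int))) [] =
      (matrix.map (fun r => r.take w)).flatten := by
    rw [PySem.List.foldl_append_eq_flatMap]
    simp only [List.nil_append, PySem.List.slice_to_natCast, List.flatMap_def]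
  have hlens : ∀ r ∈ matrix.map (fun r => r.take w), r.length = w := by
    intro r hr
    simp only [List.mem_map] at hr
    obtain ⟨s, hs, rfl⟩ := hr
    simp [List.length_take, Nat.min_eq_left (hall s hs)]
  have hflatlen : (matrix.map (fun r => r.take w)).flatten.length = matrix.length * w := by
    rw [List.length_flatten]
    have hrepl : (matrix.map (fun r => r.take w)).map List.length =
        List.replicate matrix.length w := by
      rw [List.eq_replicate_iff]
      refine ⟨by simp, fun x hx => ?_⟩
      simp only [List.mem_map, List.mem_map] at hx
      obtain ⟨r, hr, rfl⟩ := hx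
      obtain ⟨s, hs, rfl⟩ := hr
      simp [List.length_take, Nat.min_eq_left (hall s hs)]
    rw [hrepl, List.sum_replicate, smul_eq_mul]
  simp only [transpose_boolean_matrix_alt, hw, hflat, hflatlen]
  unfold pvCanon
  rw [PySem.List.pyRange_one]
  simp only [Int.sub_zero, Int.toNat_natCast, List.map_map]
  apply List.map_congr_left
  intro j hj
  simp only [List.mem_range] at hj
  simp only [Function.comp]
  rw [show ((0 : Int) + (j : Nat)) = ((j : Nat) : Int) by omega]
  rw [pvStrideRange matrix.length w j hj]
  rw [List.map_map]
  apply List.ext_getElem (by simp)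
  intro t ht1 ht2
  simp only [List.length_map, List.length_range] at ht1
  simp only [List.getElem_map, List.getElem_range, Function.comp]
  rw [PySem.List.pyGetD_of_nonneg _ _ (by exact_mod_cast Nat.zero_le (j + w * t))]
  rw [Int.toNat_natCast]
  rw [show j + w * t = t * w + j from by ring]
  rw [pvFlatGet (matrix.map (fun r => r.take w)) w hlens t j hj (by simpa using ht1)]
  have hrowt : (matrix.map (fun r => r.take w)).getD t [] = matrix[t].take w := by
    rw [List.getD_eq_getElem?_getD, List.getElem?_map, List.getElem?_eq_getElem ht1]
    rfl
  rw [hrowt]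
  rw [List.getD_eq_getElem?_getD, List.getElem?_take, List.getD_eq_getElem?_getD]
  simp [hj]

-- ===== VERDICT (by name: the statement is the Claim_ definition above) =====
theorem transpose_boolean_matrix_spec : Claim_equal_transpose_boolean_matrix := by
  intro matrix _ hpre
  obtain ⟨_, hall⟩ := hpre
  unfold Spec_transpose_boolean_matrix transpose_boolean_matrix
  rw [pvAfold_eq matrix ((matrix.headD []).length), pvBside_eq matrix ((matrix.headD []).length) rfl hall]
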